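-- pv_equiv track=rewrite | github.com/OisinDavey/ProjectEuler | Problem26.py | LengthOfCycle
-- ===== SOURCE A (Python) =====
-- def LengthOfCycle(n):
--     k = 1
--     I = 0
--     Q = [-1 for _ in range(2*n)]
--     while(True):
--         if k == 0:
--             return 0
--         if Q[k] != -1:
--             return I-Q[k]
--         Q[k] = I
--         k *= 10
--         k %= n
--         I += 1
-- ===== SOURCE B (Python) =====
-- def LengthOfCycle(n):
--     # Constant-memory cycle-length: run n steps of k -> k*10 % n to land
--     # inside the eventual cycle, then count steps until the remainder recurs.
--     k = 1
--     for _ in range(n):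
--         k = k * 10 % n
--     if k == 0:
--         return 0
--     t = k
--     c = 0
--     while True:
--         k = k * 10 % n
--         c += 1
--         if k == t:
--             return c
-- ===== Notes on version B (the rewrite author's own statement) =====
-- stated objective: alternative
-- what changed: B replaces A's O(n) first-visit table (detect any repeated remainder and subtract recorded indices) with a constant-memory two-phase walk: advance the remainder n steps to land inside the eventual cycle, then count steps until that remainder recurs.
-- outside the precondition, e.g. on LengthOfCycle(0): A raises IndexError, B raises ZeroDivisionError
import Mathlib
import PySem

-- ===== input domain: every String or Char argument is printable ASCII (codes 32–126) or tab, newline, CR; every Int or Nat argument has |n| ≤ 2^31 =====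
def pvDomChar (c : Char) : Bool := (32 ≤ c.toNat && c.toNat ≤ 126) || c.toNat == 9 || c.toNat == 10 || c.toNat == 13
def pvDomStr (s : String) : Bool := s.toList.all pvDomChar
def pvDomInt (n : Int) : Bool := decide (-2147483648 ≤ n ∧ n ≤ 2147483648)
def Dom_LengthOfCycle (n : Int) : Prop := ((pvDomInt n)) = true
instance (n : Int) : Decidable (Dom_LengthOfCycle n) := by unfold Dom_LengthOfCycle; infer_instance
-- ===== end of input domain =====

-- B replaces A's O(n) first-visit table with a constant-memory two-phase cycle walk (run n steps, then count steps until the remainder recurs); return values agree for all n ≥ 1.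


-- ===== PORT A =====
-- the 'while True' loop of A, with fuel (fuel exhaustion / IndexError return junk 0; both are
-- impossible under Pre_, proved below)
def lcALoop (n : Int) (fuel : Nat) (k I : Int) (Q : List Int) : Int :=
  match fuel with
  | 0 => 0
  | f+1 =>
    if k = 0 then 0
    else
      match PySem.List.pyGet? Q k with
      | none => 0
      | some q =>
        if q ≠ -1 then I - q
        else lcALoop n f (PySem.Int.mod (k*10) n) (I+1) (PySem.List.pySetD Q k I)

def LengthOfCycle (n : Int) : Int :=
  lcALoop n ((2*n).toNat + 2) 1 0 ((PySem.List.pyRange 0 (2*n) 1).map (fun _ => (-1:Int)))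

-- ===== PORT B =====
-- the 'while True' loop of B, with fuel (never exhausted under Pre_, proved below)
def lcBLoop (n : Int) (fuel : Nat) (k t c : Int) : Int :=
  match fuel with
  | 0 => 0
  | f+1 =>
    let k' := PySem.Int.mod (k*10) n
    if k' = t then c + 1 else lcBLoop n f k' t (c+1)

def LengthOfCycle_alt (n : Int) : Int :=
  let k := (PySem.List.pyRange 0 n 1).foldl (fun k _ => PySem.Int.mod (k*10) n) 1
  if k = 0 then 0 else lcBLoop n ((2*n).toNat + 2) k k 0

-- ===== PRECONDITION & SPEC =====
-- Pre_ excludes exactly n ≤ 0: there A raises IndexError (Q is empty, Q[1] fails); B raises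
-- ZeroDivisionError (n = 0) or loops (n < 0), so nothing is claimed there.
def Pre_LengthOfCycle (n : Int) : Prop := 1 ≤ n
instance (n : Int) : Decidable (Pre_LengthOfCycle n) := by unfold Pre_LengthOfCycle; infer_instance
def pvWitness_LengthOfCycle : Int := (7)

def Spec_LengthOfCycle (n : Int) (out : Int) : Prop := out = LengthOfCycle_alt n
instance (n : Int) (out : Int) : Decidable (Spec_LengthOfCycle n out) := by unfold Spec_LengthOfCycle; infer_instance

-- ===== CLAIM (what is proved, stated in full; the proofs are below) =====
def Claim_equal_LengthOfCycle : Prop := ∀ (n : Int), Dom_LengthOfCycle n → Pre_LengthOfCycle n → Spec_LengthOfCycle n (LengthOfCycle n)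

-- ===== LEMMAS AND PROOFS =====

-- the step map k ↦ k*10 % n and the remainder sequence x t = 10^t mod n (x 0 = 1)
def pvG (n k : Int) : Int := PySem.Int.mod (k*10) n
def pvX (n : Int) (t : Nat) : Int := (pvG n)^[t] 1

lemma pvX_zero (n : Int) : pvX n 0 = 1 := rfl

lemma pvX_succ (n : Int) (t : Nat) : pvX n (t+1) = pvG n (pvX n t) := by
  simp [pvX, Function.iterate_succ_apply']

lemma pvG_nonneg (n : Int) (hn : 1 ≤ n) (k : Int) : 0 ≤ pvG n k := by
  simpa [pvG] using PySem.Int.mod_nonneg (k*10) (by omega : (0:Int) < n)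

lemma pvG_lt (n : Int) (hn : 1 ≤ n) (k : Int) : pvG n k < n := by
  simpa [pvG] using PySem.Int.mod_lt (k*10) (by omega : (0:Int) < n)

lemma pvG_zero (n : Int) (hn : 1 ≤ n) : pvG n 0 = 0 := by
  rw [pvG, PySem.Int.mod_eq_emod_of_pos (by omega : (0:Int) < n)]; simp

lemma pvX_nonneg (n : Int) (hn : 1 ≤ n) (t : Nat) : 0 ≤ pvX n t := by
  cases t with
  | zero => simp [pvX_zero]
  | succ t => rw [pvX_succ]; exact pvG_nonneg n hn _

lemma pvX_lt (n : Int) (hn : 1 ≤ n) (t : Nat) (ht : 1 ≤ t) : pvX n t < n := by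
  cases t with
  | zero => omega
  | succ t => rw [pvX_succ]; exact pvG_lt n hn _

lemma pvX_lt_two (n : Int) (hn : 1 ≤ n) (t : Nat) : pvX n t < 2*n := by
  cases t with
  | zero => simp [pvX_zero]; omega
  | succ t => have := pvX_lt n hn (t+1) (by omega); omega

lemma pvX_add (n : Int) (a b : Nat) : pvX n (a + b) = (pvG n)^[b] (pvX n a) := by
  simp [pvX, Nat.add_comm a b, Function.iterate_add_apply]

-- once the sequence repeats with period p from index a on, it is p-periodic from a on
lemma pvPer (n : Int) (a p : Nat) (h : pvX n (a+p) = pvX n a) :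
    ∀ t, a ≤ t → pvX n (t+p) = pvX n t := by
  intro t ht
  obtain ⟨d, rfl⟩ : ∃ d, t = a + d := ⟨t - a, by omega⟩
  have h1 : a + d + p = (a + p) + d := by omega
  rw [h1, pvX_add, h, ← pvX_add]

lemma pvModred (n : Int) (a p : Nat) (hp : 0 < p) (h : pvX n (a+p) = pvX n a) :
    ∀ t, a ≤ t → pvX n t = pvX n (a + (t-a) % p) := by
  intro t
  induction t using Nat.strong_induction_on with
  | _ t ih =>
    intro ht
    by_cases hlt : t < a + p
    · have : (t - a) % p = t - a := Nat.mod_eq_of_lt (by omega)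
      rw [this]; congr 1; omega
    · have h1 : t = (t - p) + p := by omega
      have h2 : pvX n t = pvX n (t - p) := by
        conv_lhs => rw [h1]
        exact pvPer n a p h _ (by omega)
      have h3 : (t - a) % p = ((t - p) - a) % p := by
        have : t - a = ((t - p) - a) + p := by omega
        rw [this, Nat.add_mod_right]
      rw [h2, h3]; exact ih (t - p) (by omega) (by omega)

-- distinct prefix values give a cardinality bound on the prefix length
lemma pvCardBound (n : Int) (hn : 2 ≤ n) (B : Nat)
    (hNR : ∀ a b, a < b → b < B → pvX n a ≠ pvX n b)
    (hnz : ∀ s, s < B → pvX n s ≠ 0) : B ≤ (n-1).toNat := by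
  have hmaps : ∀ s ∈ Finset.range B, pvX n s ∈ Finset.Ico (1:Int) n := by
    intro s hs
    rw [Finset.mem_range] at hs
    rw [Finset.mem_Ico]
    have h0 := pvX_nonneg n (by omega) s
    have hz := hnz s hs
    constructor
    · omega
    · cases s with
      | zero => simp [pvX_zero]; omega
      | succ s => exact pvX_lt n (by omega) _ (by omega)
  have hinj : Set.InjOn (pvX n) (Finset.range B) := by
    intro a ha b hb hab
    simp only [Finset.coe_range, Set.mem_Iio] at ha hb
    rcases lt_trichotomy a b with h | h | h
    · exact absurd hab (hNR a b h hb)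
    · exact h
    · exact absurd hab.symm (hNR b a h ha)
  have := Finset.card_le_card_of_injOn (pvX n) hmaps hinj
  simpa [Int.card_Ico] using this

-- the Q table of A after I steps: entry m = first index t < I with x t = m, else -1
def pvFirst (n : Int) (I m : Nat) : Int :=
  if h : ∃ t, t < I ∧ pvX n t = (m:Int) then (Nat.find h : Int) else -1

def pvQ (n : Int) (I : Nat) : List Int := (List.range (2*n).toNat).map (pvFirst n I)

lemma pvFirst_eq_neg_one_iff (n : Int) (I m : Nat) :
    pvFirst n I m = -1 ↔ ∀ t, t < I → pvX n t ≠ (m:Int) := by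
  unfold pvFirst
  split
  · rename_i h
    constructor
    · intro habs; omega
    · intro hall; exact absurd h (by push_neg; intro t ht; exact hall t ht)
  · rename_i h
    push_neg at h
    exact ⟨fun _ => h, fun _ => rfl⟩

lemma pvFirst_eq_coe_iff (n : Int) (I m j : Nat) :
    pvFirst n I m = (j:Int) ↔ j < I ∧ pvX n j = (m:Int) ∧ ∀ t, t < j → pvX n t ≠ (m:Int) := by
  unfold pvFirst
  split
  · rename_i h
    rw [Int.natCast_inj, Nat.find_eq_iff]
    constructor
    · rintro ⟨⟨h1, h2⟩, h3⟩
      exact ⟨h1, h2, fun t ht habs => h3 t ht ⟨by omega, habs⟩⟩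
    · rintro ⟨h1, h2, h3⟩
      exact ⟨⟨h1, h2⟩, fun t ht ⟨_, habs⟩ => h3 t ht habs⟩
  · rename_i h
    push_neg at h
    constructor
    · intro habs; omega
    · rintro ⟨h1, h2, _⟩; exact absurd h2 (h j h1)

lemma pvQ_get (n : Int) (I : Nat) (k : Int) (h0 : 0 ≤ k) (h2 : k < 2*n) :
    PySem.List.pyGet? (pvQ n I) k = some (pvFirst n I k.toNat) := by
  rw [PySem.List.pyGet?_of_nonneg _ h0]
  have hk : k.toNat < (2*n).toNat := by omega
  simp [pvQ, hk]

lemma pvQ_zero (n : Int) :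
    (PySem.List.pyRange 0 (2*n) 1).map (fun _ => (-1:Int)) = pvQ n 0 := by
  rw [PySem.List.pyRange_one]
  rw [show (2*n - 0 : Int) = 2*n from by ring]
  simp only [pvQ, List.map_map]
  apply List.map_congr_left
  intro m _
  simp only [Function.comp_apply]
  rw [eq_comm, pvFirst_eq_neg_one_iff]
  omega

lemma pvQ_set (n : Int) (hn : 1 ≤ n) (s : Nat)
    (hnoprev : ∀ t, t < s → pvX n t ≠ pvX n s) :
    (pvQ n s).set (pvX n s).toNat ((s:Nat):Int) = pvQ n (s+1) := by
  have hx0 : ((pvX n s).toNat : Int) = pvX n s := Int.toNat_of_nonneg (pvX_nonneg n hn s)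
  apply List.ext_getElem
  · simp [pvQ]
  · intro m hm1 hm2
    simp only [pvQ, List.length_map, List.length_range] at hm2
    rw [List.getElem_set]
    simp only [pvQ, List.getElem_map, List.getElem_range]
    split
    · rename_i he
      rw [eq_comm, pvFirst_eq_coe_iff, ← he, hx0]
      exact ⟨by omega, rfl, fun t ht => hnoprev t ht⟩
    · rename_i he
      have hne : (m:Int) ≠ pvX n s := by
        intro habs; exact he (by omega)
      by_cases hex : ∃ t, t < s ∧ pvX n t = (m:Int)
      · have h1 : pvFirst n s m = (Nat.find hex : Int) := by
          rw [pvFirst_eq_coe_iff]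
          obtain ⟨ht1, ht2⟩ := Nat.find_spec hex
          exact ⟨ht1, ht2, fun t ht habs => Nat.find_min hex ht ⟨by omega, habs⟩⟩
        rw [h1, eq_comm, pvFirst_eq_coe_iff]
        obtain ⟨ht1, ht2⟩ := Nat.find_spec hex
        exact ⟨by omega, ht2, fun t ht habs => Nat.find_min hex ht ⟨by omega, habs⟩⟩
      · push_neg at hex
        have h1 : pvFirst n s m = -1 := (pvFirst_eq_neg_one_iff n s m).2 hex
        rw [h1, eq_comm, pvFirst_eq_neg_one_iff]
        intro t ht
        rcases Nat.lt_or_ge t s with h | h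
        · exact hex t h
        · have : t = s := by omega
          subst this
          exact fun habs => hne habs.symm
-- one unwinding of A's loop at a not-yet-repeated, nonzero state
lemma lcA_step (n : Int) (hn : 1 ≤ n) (s : Nat) (f : Nat)
    (hnz : pvX n s ≠ 0)
    (hnoprev : ∀ t, t < s → pvX n t ≠ pvX n s) :
    lcALoop n (f+1) (pvX n s) ((s:Nat):Int) (pvQ n s)
      = lcALoop n f (pvX n (s+1)) (((s+1:Nat)):Int) (pvQ n (s+1)) := by
  rw [lcALoop]
  rw [if_neg hnz]
  rw [pvQ_get n s _ (pvX_nonneg n hn s) (pvX_lt_two n hn s)]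
  have h1 : pvFirst n s (pvX n s).toNat = -1 := by
    rw [pvFirst_eq_neg_one_iff]
    intro t ht
    rw [Int.toNat_of_nonneg (pvX_nonneg n hn s)]
    exact hnoprev t ht
  rw [h1]
  simp only [ne_eq, not_true_eq_false, if_false]
  rw [PySem.List.pySetD_of_nonneg _ _ (pvX_nonneg n hn s), pvQ_set n hn s hnoprev]
  have e1 : pvG n (pvX n s) = pvX n (s+1) := (pvX_succ n s).symm
  have e2 : ((s:Nat):Int) + 1 = (((s+1:Nat)):Int) := by push_cast; ring
  rw [← e2, ← e1]
  rfl

-- run A's loop from step s to step B (no return happens strictly before B)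
lemma lcA_run (n : Int) (hn : 1 ≤ n) (B : Nat)
    (hNR : ∀ a b, a < b → b < B → pvX n a ≠ pvX n b)
    (hnzB : ∀ s, s < B → pvX n s ≠ 0)
    (OUT : Int)
    (hfin : ∀ f', lcALoop n (f'+1) (pvX n B) ((B:Nat):Int) (pvQ n B) = OUT) :
    ∀ f s, s ≤ B → B - s < f → lcALoop n f (pvX n s) ((s:Nat):Int) (pvQ n s) = OUT := by
  intro f
  induction f with
  | zero => intro s _ h; omega
  | succ f ih =>
    intro s hs hf
    rcases Nat.eq_or_lt_of_le hs with h | h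
    · subst h; exact hfin f
    · rw [lcA_step n hn s f (hnzB s h) (fun t ht => hNR t s ht h)]
      exact ih (s+1) (by omega) (by omega)

-- B's counting loop returns the exact period
lemma lcB_run (n : Int) (N lam : Nat) (hlam : 0 < lam)
    (hper : pvX n (N + lam) = pvX n N)
    (hmind : ∀ d, 0 < d → d < lam → pvX n (N + d) ≠ pvX n N) :
    ∀ f c, c < lam → lam - c ≤ f →
      lcBLoop n f (pvX n (N + c)) (pvX n N) ((c:Nat):Int) = ((lam:Nat):Int) := by
  intro f
  induction f with
  | zero => intro c _ h; omega
  | succ f ih =>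
    intro c hc hf
    rw [lcBLoop]
    have e1 : PySem.Int.mod (pvX n (N + c) * 10) n = pvX n (N + (c+1)) := by
      have : N + (c+1) = (N + c) + 1 := by omega
      rw [this, pvX_succ]; rfl
    simp only [e1]
    by_cases he : c + 1 = lam
    · rw [if_pos (by rw [he]; exact hper)]
      push_cast; omega
    · rw [if_neg (hmind (c+1) (by omega) (by omega))]
      have e2 : ((c:Nat):Int) + 1 = (((c+1:Nat)):Int) := by push_cast; ring
      rw [e2]
      exact ih (c+1) (by omega) (by omega)

-- phase 1 of B is iteration of the step map
lemma pvFoldl (n : Int) (l : List Int) (k : Int) :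
    l.foldl (fun k _ => PySem.Int.mod (k*10) n) k = (pvG n)^[l.length] k := by
  induction l generalizing k with
  | nil => rfl
  | cons a l ih => simp [List.foldl_cons, ih, Function.iterate_succ_apply]; rfl

lemma pvB_phase1 (n : Int) (hn : 1 ≤ n) :
    (PySem.List.pyRange 0 n 1).foldl (fun k _ => PySem.Int.mod (k*10) n) 1 = pvX n n.toNat := by
  rw [pvFoldl]
  simp [pvX, PySem.List.length_pyRange_one]

-- once the sequence hits 0 it stays 0
lemma pvX_stays_zero (n : Int) (hn : 1 ≤ n) (t s : Nat) (ht : pvX n t = 0) (hts : t ≤ s) :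
    pvX n s = 0 := by
  obtain ⟨d, rfl⟩ : ∃ d, s = t + d := ⟨s - t, by omega⟩
  clear hts
  induction d with
  | zero => exact ht
  | succ d ih =>
    have : t + (d+1) = (t + d) + 1 := by omega
    rw [this, pvX_succ, ih, pvG_zero n hn]

-- ===== VERDICT (by name: the statement is the Claim_ definition above) =====
theorem LengthOfCycle_spec : Claim_equal_LengthOfCycle := by
  intro n _ hpre
  have hn : (1:Int) ≤ n := hpre
  unfold Spec_LengthOfCycle
  by_cases hz : ∃ t, pvX n t = 0
  · -- the sequence hits 0 (n = 2^a * 5^b): both return 0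
    have ht0 : pvX n (Nat.find hz) = 0 := Nat.find_spec hz
    have hmin : ∀ s, s < Nat.find hz → pvX n s ≠ 0 := fun s hs => Nat.find_min hz hs
    have hNR : ∀ a b, a < b → b < Nat.find hz → pvX n a ≠ pvX n b := by
      intro a b hab hb habs
      have hper : pvX n (a + (b-a)) = pvX n a := by
        rw [show a+(b-a) = b by omega]; exact habs.symm
      have hmr := pvModred n a (b-a) (by omega) hper (Nat.find hz) (by omega)
      have hr : (Nat.find hz - a) % (b-a) < b - a := Nat.mod_lt _ (by omega)
      exact hmin (a + (Nat.find hz - a)%(b-a)) (by omega) (by rw [← hmr]; exact ht0)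
    have ht0N : Nat.find hz ≤ n.toNat := by
      rcases Nat.lt_or_ge (Nat.find hz) 2 with h | h
      · omega
      · have h1 : pvX n 1 ≠ 0 := hmin 1 (by omega)
        have h2 : pvX n 1 < n := pvX_lt n hn 1 le_rfl
        have h3 : 0 ≤ pvX n 1 := pvX_nonneg n hn 1
        have := pvCardBound n (by omega) (Nat.find hz) hNR hmin
        omega
    have hA : LengthOfCycle n = 0 := by
      unfold LengthOfCycle
      rw [pvQ_zero]
      have h := lcA_run n hn (Nat.find hz) hNR hmin 0
        (fun f' => by simp [lcALoop, ht0]) ((2*n).toNat + 2) 0 (by omega) (by omega)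
      simpa [pvX_zero] using h
    have h0 : pvX n n.toNat = 0 := pvX_stays_zero n hn (Nat.find hz) n.toNat ht0 ht0N
    have hB : LengthOfCycle_alt n = 0 := by
      simp [LengthOfCycle_alt, pvB_phase1 n hn, h0]
    rw [hA, hB]
  · -- the sequence never hits 0: both return the exact period of the remainder sequence
    push_neg at hz
    have hn2 : (2:Int) ≤ n := by
      have h1 := pvX_lt n hn 1 le_rfl
      have h2 := pvX_nonneg n hn 1
      have h3 := hz 1
      omega
    have hEx : ∃ i, 0 < i ∧ ∃ j, j < i ∧ pvX n j = pvX n i := by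
      obtain ⟨x, hx, y, hy, hne, hxy⟩ :=
        Finset.exists_ne_map_eq_of_card_lt_of_maps_to
          (s := Finset.range (n.toNat+1)) (t := Finset.Ico (1:Int) n) (f := pvX n)
          (by rw [Int.card_Ico]; simp only [Finset.card_range]; omega)
          (by
            intro s _
            simp only [Finset.coe_Ico, Set.mem_Ico]
            have h0 := pvX_nonneg n hn s
            have h1 := hz s
            refine ⟨by omega, ?_⟩
            cases s with
            | zero => simp [pvX_zero]; omega
            | succ s => exact pvX_lt n hn _ (by omega))
      rcases Nat.lt_or_gt_of_ne hne with h | h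
      · exact ⟨y, by omega, x, h, hxy⟩
      · exact ⟨x, by omega, y, h, hxy.symm⟩
    obtain ⟨hi0pos, hj⟩ := Nat.find_spec hEx
    have hj0lt : Nat.find hj < Nat.find hEx := (Nat.find_spec hj).1
    have hj0eq : pvX n (Nat.find hj) = pvX n (Nat.find hEx) := (Nat.find_spec hj).2
    have hNR : ∀ a b, a < b → b < Nat.find hEx → pvX n a ≠ pvX n b := by
      intro a b hab hb habs
      exact absurd ⟨by omega, a, hab, habs⟩ (Nat.find_min hEx hb)
    have hlam : 0 < Nat.find hEx - Nat.find hj := by omega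
    have hper0 : pvX n (Nat.find hj + (Nat.find hEx - Nat.find hj)) = pvX n (Nat.find hj) := by
      rw [show Nat.find hj + (Nat.find hEx - Nat.find hj) = Nat.find hEx by omega]
      exact hj0eq.symm
    have hi0N : Nat.find hEx ≤ n.toNat := by
      have := pvCardBound n hn2 (Nat.find hEx) hNR (fun s _ => hz s)
      omega
    have hperN : pvX n (n.toNat + (Nat.find hEx - Nat.find hj)) = pvX n n.toNat :=
      pvPer n (Nat.find hj) _ hper0 n.toNat (by omega)
    have hmind : ∀ d, 0 < d → d < Nat.find hEx - Nat.find hj →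
        pvX n (n.toNat + d) ≠ pvX n n.toNat := by
      intro d hd1 hd2 habs
      have hmr := pvModred n (Nat.find hj) _ hlam hper0
      have e1 := hmr (n.toNat + d) (by omega)
      have e2 := hmr n.toNat (by omega)
      have hr1lt : (n.toNat + d - Nat.find hj) % (Nat.find hEx - Nat.find hj)
          < Nat.find hEx - Nat.find hj := Nat.mod_lt _ hlam
      have hr2lt : (n.toNat - Nat.find hj) % (Nat.find hEx - Nat.find hj)
          < Nat.find hEx - Nat.find hj := Nat.mod_lt _ hlam
      have heq : pvX n (Nat.find hj + (n.toNat + d - Nat.find hj) % (Nat.find hEx - Nat.find hj))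
          = pvX n (Nat.find hj + (n.toNat - Nat.find hj) % (Nat.find hEx - Nat.find hj)) := by
        rw [← e1, ← e2, habs]
      have hreq : (n.toNat + d - Nat.find hj) % (Nat.find hEx - Nat.find hj)
          = (n.toNat - Nat.find hj) % (Nat.find hEx - Nat.find hj) := by
        rcases Nat.lt_trichotomy ((n.toNat + d - Nat.find hj) % (Nat.find hEx - Nat.find hj))
          ((n.toNat - Nat.find hj) % (Nat.find hEx - Nat.find hj)) with h | h | h
        · exact absurd heq (hNR _ _ (by omega) (by omega))
        · exact h
        · exact absurd heq.symm (hNR _ _ (by omega) (by omega))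
      have he' : (n.toNat - Nat.find hj) ≡ (n.toNat - Nat.find hj) + d
          [MOD (Nat.find hEx - Nat.find hj)] := by
        unfold Nat.ModEq
        rw [show n.toNat - Nat.find hj + d = n.toNat + d - Nat.find hj by omega]
        exact hreq.symm
      have hdvd := (Nat.modEq_iff_dvd' (by omega)).1 he'
      rw [show (n.toNat - Nat.find hj) + d - (n.toNat - Nat.find hj) = d by omega] at hdvd
      have := Nat.le_of_dvd hd1 hdvd
      omega
    have hBval : LengthOfCycle_alt n = ((Nat.find hEx - Nat.find hj : Nat) : Int) := by
      have h1 : pvX n n.toNat ≠ 0 := hz n.toNat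
      have h := lcB_run n n.toNat _ hlam hperN hmind ((2*n).toNat+2) 0 hlam (by omega)
      simp only [Nat.add_zero, Nat.cast_zero] at h
      simp [LengthOfCycle_alt, pvB_phase1 n hn, h1, h]
    have hAval : LengthOfCycle n = ((Nat.find hEx : Nat) : Int) - ((Nat.find hj : Nat) : Int) := by
      unfold LengthOfCycle
      rw [pvQ_zero]
      have hfin : ∀ f', lcALoop n (f'+1) (pvX n (Nat.find hEx)) ((Nat.find hEx : Nat) : Int)
          (pvQ n (Nat.find hEx)) = ((Nat.find hEx : Nat) : Int) - ((Nat.find hj : Nat) : Int) := by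
        intro f'
        rw [lcALoop]
        rw [if_neg (hz (Nat.find hEx))]
        rw [pvQ_get n (Nat.find hEx) _ (pvX_nonneg n hn _) (pvX_lt_two n hn _)]
        have hfirst : pvFirst n (Nat.find hEx) (pvX n (Nat.find hEx)).toNat
            = ((Nat.find hj : Nat) : Int) := by
          rw [pvFirst_eq_coe_iff, Int.toNat_of_nonneg (pvX_nonneg n hn _)]
          exact ⟨hj0lt, hj0eq, fun t ht habs => Nat.find_min hj ht ⟨by omega, habs⟩⟩
        rw [hfirst]
        simp
      have h := lcA_run n hn (Nat.find hEx) hNR (fun s _ => hz s) _ hfin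
        ((2*n).toNat+2) 0 (by omega) (by omega)
      simpa [pvX_zero] using h
    rw [hAval, hBval]
    push_cast
    omega
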